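-- pv_equiv track=rewrite | github.com/Skwgasnaw/PQC_Cortex-M4_NTRU-NTT | _NTT_ntruhps2048677.py | cal_ntt_coefficient
-- ===== SOURCE A (Python) =====
-- def cal_ntt_coefficient(judge):
--     cal_indexA = [0, 4, 2, 6, 1, 5, 3, 7]
--     for i in range(0, 3):
--         cal_indexA = [j * 2 for j in cal_indexA]
--         cal_indexB = [j + 1 for j in cal_indexA]
--         cal_indexC = cal_indexA + cal_indexB
--         if judge == "zeta" and i == 2:
--             return cal_indexC
--         else:
--             cal_indexC = [j * 2 for j in cal_indexC]
--             cal_indexB = [j + 1 for j in cal_indexC]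
--             cal_indexA = cal_indexC + cal_indexB
--     return cal_indexA
-- ===== SOURCE B (Python) =====
-- def cal_ntt_coefficient(judge):
--     n = 8 if judge == "zeta" else 9
--     out = []
--     for i in range(1 << n):
--         rev = 0
--         for b in range(n):
--             rev = (rev << 1) | ((i >> b) & 1)
--         out.append(rev)
--     return out
-- ===== Notes on version B (the rewrite author's own statement) =====
-- stated objective: idiomatic
-- what changed: B computes each table entry directly as the n-bit reversal of its index (n=8 for "zeta", else 9) instead of A's repeated list-doubling/concatenation construction.
import Mathlib
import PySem

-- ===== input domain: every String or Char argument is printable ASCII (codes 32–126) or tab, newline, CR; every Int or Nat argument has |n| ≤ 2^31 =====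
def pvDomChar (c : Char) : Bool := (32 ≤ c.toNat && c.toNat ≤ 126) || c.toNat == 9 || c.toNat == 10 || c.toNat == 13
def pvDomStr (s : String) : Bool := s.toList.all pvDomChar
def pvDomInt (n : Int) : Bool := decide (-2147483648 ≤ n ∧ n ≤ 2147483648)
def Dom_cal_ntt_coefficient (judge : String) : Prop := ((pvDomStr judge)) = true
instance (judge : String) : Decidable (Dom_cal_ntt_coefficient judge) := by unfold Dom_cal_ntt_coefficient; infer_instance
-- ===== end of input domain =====

-- B replaces A's list-doubling/concatenation construction by computing each entry directly
-- as the n-bit reversal of its index (n = 8 for "zeta", else 9); same values, not faster (idiomatic).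

-- ===== PORT A =====
-- fuel = number of remaining loop iterations (3 - i), structural recursion; faithful to A's
-- 'for i in range(0,3)' with the early return inside.
def calGoA (judge : String) : Nat → Nat → List Int → List Int
  | 0, _, a => a
  | fuel + 1, i, a =>
      let a' := a.map (fun j => j * 2)
      let b := a'.map (fun j => j + 1)
      let c := a' ++ b
      if judge == "zeta" && i == 2 then c
      else
        let c' := c.map (fun j => j * 2)
        let b' := c'.map (fun j => j + 1)
        calGoA judge fuel (i + 1) (c' ++ b')

def cal_ntt_coefficient (judge : String) : List Int :=
  calGoA judge 3 0 [0, 4, 2, 6, 1, 5, 3, 7]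

-- ===== PORT B =====
-- inner loop of Source B: rev = (rev << 1) | ((i >> b) & 1); all operands are nonnegative here,
-- so (<<1)|… = *2 + … and (i>>b)&1 = (i / 2^b) % 2 exactly.
def revBits (n : Nat) (i : Int) : Int :=
  (List.range n).foldl (fun rev b => rev * 2 + ((i / (2 ^ b : Int)) % 2)) 0

def cal_ntt_coefficient_alt (judge : String) : List Int :=
  let n : Nat := if judge == "zeta" then 8 else 9
  (List.range (1 <<< n)).map (fun i => revBits n (Int.ofNat i))

-- ===== PRECONDITION & SPEC =====
def Spec_cal_ntt_coefficient (judge : String) (out : List Int) : Prop := out = cal_ntt_coefficient_alt judge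
instance (judge : String) (out : List Int) : Decidable (Spec_cal_ntt_coefficient judge out) := by unfold Spec_cal_ntt_coefficient; infer_instance

-- ===== CLAIM (what is proved, stated in full; the proofs are below) =====
def Claim_equal_cal_ntt_coefficient : Prop := ∀ (judge : String), Dom_cal_ntt_coefficient judge → Spec_cal_ntt_coefficient judge (cal_ntt_coefficient judge)

-- ===== LEMMAS AND PROOFS =====
-- For two non-"zeta" strings, A's loop body never takes the early return and is independent of judge.
theorem calGoA_congr (j1 j2 : String) (h1 : (j1 == "zeta") = false) (h2 : (j2 == "zeta") = false) :
    ∀ (fuel i : Nat) (a : List Int), calGoA j1 fuel i a = calGoA j2 fuel i a := by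
  intro fuel
  induction fuel with
  | zero => intro i a; rfl
  | succ k ih => intro i a; simp [calGoA, h1, h2, ih]

theorem alt_nonzeta (judge : String) (h : (judge == "zeta") = false) :
    cal_ntt_coefficient_alt judge = cal_ntt_coefficient_alt "" := by
  simp [cal_ntt_coefficient_alt, h]

set_option maxRecDepth 10000 in
theorem equal_zeta : cal_ntt_coefficient "zeta" = cal_ntt_coefficient_alt "zeta" := by decide

set_option maxRecDepth 10000 in
theorem equal_empty : cal_ntt_coefficient "" = cal_ntt_coefficient_alt "" := by decide

-- ===== VERDICT (by name: the statement is the Claim_ definition above) =====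
theorem cal_ntt_coefficient_spec : Claim_equal_cal_ntt_coefficient := by
  intro judge _
  unfold Spec_cal_ntt_coefficient
  by_cases h : judge = "zeta"
  · subst h; exact equal_zeta
  · have hb : (judge == "zeta") = false := by simpa using h
    calc cal_ntt_coefficient judge
        = cal_ntt_coefficient "" := calGoA_congr judge "" hb (by decide) 3 0 _
      _ = cal_ntt_coefficient_alt "" := equal_empty
      _ = cal_ntt_coefficient_alt judge := (alt_nonzeta judge hb).symm
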